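-- pv_equiv track=rewrite | github.com/epsy/clize | clize/util.py | to_kebap_case
-- ===== SOURCE A (Python) =====
-- def to_kebap_case(s):
--     had_letter = False
--     for c in s:
--         if c == '_':
--             if had_letter:
--                 had_letter = False
--                 yield '-'
--         elif c.isupper():
--             if had_letter:
--                 yield '-'
--             yield c.lower()
--             had_letter = True
--         else:
--             yield c
--             had_letter = True
-- ===== SOURCE B (Python) =====
-- def to_kebap_case(s):
--     # pass 1: rewrite each uppercase letter as '_' + its lowercase form
--     t = ''.join('_' + c.lower() if c.isupper() else c for c in s)
--     # pass 2: drop leading separators, collapse each run of '_' into a single '-'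
--     prev_us = False
--     for c in t.lstrip('_'):
--         if c == '_':
--             if not prev_us:
--                 yield '-'
--             prev_us = True
--         else:
--             yield c
--             prev_us = False
-- ===== Notes on version B (the rewrite author's own statement) =====
-- stated objective: alternative
-- what changed: Replaced the single-pass had_letter state machine by a two-pass normalize-then-collapse pipeline: first rewrite every uppercase letter as '_'+lowercase, then strip leading underscores and collapse each underscore run into one '-'.
import Mathlib
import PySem

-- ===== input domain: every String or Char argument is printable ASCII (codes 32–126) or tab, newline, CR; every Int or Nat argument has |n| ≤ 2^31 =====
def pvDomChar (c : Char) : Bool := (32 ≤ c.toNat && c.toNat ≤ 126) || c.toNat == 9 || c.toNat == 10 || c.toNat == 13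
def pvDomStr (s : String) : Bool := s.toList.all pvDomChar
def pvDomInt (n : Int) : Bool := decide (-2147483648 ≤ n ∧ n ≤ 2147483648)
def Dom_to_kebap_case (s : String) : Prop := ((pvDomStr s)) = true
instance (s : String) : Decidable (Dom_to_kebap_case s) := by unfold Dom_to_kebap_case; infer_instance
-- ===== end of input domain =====

-- B replaces A's single-pass had_letter state machine by a two-pass normalize-then-collapse
-- pipeline (alternative decomposition, same cost); equivalence of the yielded character lists is proved.

-- ===== PORT A =====
-- A's generator loop, state = had_letter; each yielded one-char string is a list element.
def toKebapGoA : List Char → Bool → List String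
  | [], _ => []
  | c :: rest, had =>
    if c == '_' then
      if had then "-" :: toKebapGoA rest false else toKebapGoA rest had
    else if PySem.Chars.isupper c then
      (if had then ["-"] else []) ++ (String.ofList [PySem.Chars.lowerChar c] :: toKebapGoA rest true)
    else
      String.ofList [c] :: toKebapGoA rest true

def to_kebap_case (s : String) : List String := toKebapGoA s.toList false

-- ===== PORT B =====
-- pass 1 of Source B: ''.join('_' + c.lower() if c.isupper() else c for c in s)
def toKebapNorm (cs : List Char) : List Char :=
  cs.flatMap (fun c => if PySem.Chars.isupper c then ['_', PySem.Chars.lowerChar c] else [c])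

-- pass 2 of Source B: the prev_us loop
def toKebapGoB : List Char → Bool → List String
  | [], _ => []
  | c :: rest, prev =>
    if c == '_' then
      (if prev then [] else ["-"]) ++ toKebapGoB rest true
    else
      String.ofList [c] :: toKebapGoB rest false

-- t.lstrip('_') is ported exactly as dropWhile (· == '_') (single strip character).
def to_kebap_case_alt (s : String) : List String :=
  toKebapGoB ((toKebapNorm s.toList).dropWhile (· == '_')) false

-- ===== PRECONDITION & SPEC =====
def Spec_to_kebap_case (s : String) (out : List String) : Prop := out = to_kebap_case_alt s
instance (s : String) (out : List String) : Decidable (Spec_to_kebap_case s out) := by unfold Spec_to_kebap_case; infer_instance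

-- ===== CLAIM (what is proved, stated in full; the proofs are below) =====
def Claim_equal_to_kebap_case : Prop := ∀ (s : String), Dom_to_kebap_case s → Spec_to_kebap_case s (to_kebap_case s)

-- ===== LEMMAS AND PROOFS =====

-- intermediate machine: A's loop specialised to a string with no uppercase letters
def toKebapGoU : List Char → Bool → List String
  | [], _ => []
  | c :: rest, had =>
    if c == '_' then
      (if had then ["-"] else []) ++ toKebapGoU rest false
    else
      String.ofList [c] :: toKebapGoU rest true

theorem lowerChar_ne_underscore (c : Char) (h : PySem.Chars.isupper c = true) :
    (PySem.Chars.lowerChar c == '_') = false := by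
  simp only [PySem.Chars.isupper, Bool.and_eq_true, decide_eq_true_eq] at h
  have h65 : 65 ≤ c.toNat := h.1
  have h90 : c.toNat ≤ 90 := h.2
  simp only [PySem.Chars.lowerChar, PySem.Chars.isupper, h.1, h.2, decide_true, Bool.and_self,
    beq_eq_false_iff_ne, ne_eq]
  intro hc
  have hv : (c.toNat + 32).isValidChar := Or.inl (by omega)
  have : (Char.ofNat (c.toNat + 32)).toNat = c.toNat + 32 := by
    rw [Char.toNat_ofNat, if_pos hv]
  simp only [if_true] at hc
  rw [hc] at this
  simp at this
  omega

theorem goA_eq_goU_norm (cs : List Char) : ∀ had, toKebapGoA cs had = toKebapGoU (toKebapNorm cs) had := by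
  induction cs with
  | nil => intro had; rfl
  | cons c rest ih =>
    intro had
    by_cases hu : c == '_'
    · have hc : c = '_' := by simpa using hu
      subst hc
      have h_ : PySem.Chars.isupper '_' = false := by decide
      simp only [toKebapNorm, List.flatMap_cons, h_, if_neg Bool.false_ne_true]
      cases had <;>
        simp [toKebapGoA, toKebapGoU, ih, toKebapNorm]
    · by_cases hup : PySem.Chars.isupper c = true
      · simp only [toKebapNorm, List.flatMap_cons, hup]
        have hne := lowerChar_ne_underscore c hup
        cases had <;>
          simp [toKebapGoA, toKebapGoU, hu, hup, hne, ih, toKebapNorm]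
      · simp only [toKebapNorm, List.flatMap_cons, hup]
        cases had <;>
          simp [toKebapGoA, toKebapGoU, hu, hup, ih, toKebapNorm]

theorem goU_eq_goB (cs : List Char) : ∀ had, toKebapGoU cs had = toKebapGoB cs (!had) := by
  induction cs with
  | nil => intro had; rfl
  | cons c rest ih =>
    intro had
    by_cases hu : c == '_'
    · cases had <;> simp [toKebapGoU, toKebapGoB, hu, ih false]
    · cases had <;> simp [toKebapGoU, toKebapGoB, hu, ih true]

theorem goB_true_eq_dropWhile (cs : List Char) :
    toKebapGoB cs true = toKebapGoB (cs.dropWhile (· == '_')) false := by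
  induction cs with
  | nil => rfl
  | cons c rest ih =>
    by_cases hu : c == '_'
    · simp [toKebapGoB, hu, ih]
    · simp [toKebapGoB, hu]

-- ===== VERDICT (by name: the statement is the Claim_ definition above) =====
theorem to_kebap_case_spec : Claim_equal_to_kebap_case := by
  intro s _
  unfold Spec_to_kebap_case to_kebap_case to_kebap_case_alt
  rw [goA_eq_goU_norm, goU_eq_goB, Bool.not_false, goB_true_eq_dropWhile]
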